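-- pv_equiv track=rewrite | github.com/oleast/snippets | tdt4117/e3/helper_functions.py | remove_punctuations_in_list
-- ===== SOURCE A (Python) =====
-- import string
--
-- def remove_punctuations_in_list(list):
--     """
--     Iterates over every word in a given list, generating a new list
--     of words without any punctuations.
--     This list is then returned
--     :param list: list of words
--     :return: list of words
--     """
--     words = []
--     for word in list:
--         w = ""
--         for letter in word:
--             if (string.punctuation + "\n\r\t").__contains__(letter):
--                 if w != "":
--                     words.append(w.lower())
--                     w = ""
--                 continue
--             w += letter
--         if w != "":
--             words.append(w.lower())
--     return words
-- ===== SOURCE B (Python) =====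
-- import string
--
-- _SEPS = frozenset(string.punctuation + "\n\r\t")
--
-- def remove_punctuations_in_list(list):
--     out = []
--     for word in list:
--         n = len(word)
--         i = 0
--         while i < n:
--             if word[i] in _SEPS:
--                 i += 1
--                 continue
--             j = i + 1
--             while j < n and word[j] not in _SEPS:
--                 j += 1
--             out.append(word[i:j].lower())
--             i = j
--     return out
-- ===== Notes on version B (the rewrite author's own statement) =====
-- stated objective: alternative
-- what changed: A builds each token character-by-character in a growing string accumulator with two empty-check flush guards; B extracts each maximal non-separator run with a two-pointer index scan and a single slice+lower per token, with no accumulator or flush guards.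
import Mathlib
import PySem

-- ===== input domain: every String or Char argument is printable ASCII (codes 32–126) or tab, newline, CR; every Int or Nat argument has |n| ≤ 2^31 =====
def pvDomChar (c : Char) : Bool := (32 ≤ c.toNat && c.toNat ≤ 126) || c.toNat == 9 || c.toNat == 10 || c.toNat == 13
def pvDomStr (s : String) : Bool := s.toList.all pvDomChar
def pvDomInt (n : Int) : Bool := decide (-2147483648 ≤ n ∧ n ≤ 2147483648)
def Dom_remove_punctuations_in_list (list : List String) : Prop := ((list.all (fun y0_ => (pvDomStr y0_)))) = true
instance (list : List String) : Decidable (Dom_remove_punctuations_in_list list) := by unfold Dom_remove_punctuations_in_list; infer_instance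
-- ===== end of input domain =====

-- B replaces A's per-character accumulator/flush loop with a two-pointer scan that
-- slices out maximal non-separator runs per word (alternative decomposition, same cost).


-- string.punctuation + "\n\r\t"
def pvSepChars : List Char := "!\"#$%&'()*+,-./:;<=>?@[\\]^_`{|}~\n\r\t".toList

def pvIsSep (c : Char) : Bool := pvSepChars.contains c

-- s.lower() for a string held as a list of characters
def pvLowerTok (t : List Char) : String := PySem.Str.lower (String.ofList t)

-- ===== PORT A =====
-- inner loop body: state (words, w)
def pvStepA (st : List String × List Char) (letter : Char) : List String × List Char :=
  if pvIsSep letter then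
    if st.2 ≠ [] then (st.1 ++ [pvLowerTok st.2], []) else st
  else (st.1, st.2 ++ [letter])

-- per-word body: run the letter loop, then the trailing 'if w != ""' flush
def pvWordA (words : List String) (word : String) : List String :=
  let st := word.toList.foldl pvStepA (words, [])
  if st.2 ≠ [] then st.1 ++ [pvLowerTok st.2] else st.1

def remove_punctuations_in_list (list : List String) : List String :=
  list.foldl pvWordA []

-- ===== PORT B =====
-- 'while j < n and word[j] not in _SEPS: j += 1'
def pvScanEnd (cs : List Char) (j : Nat) : Nat :=
  if h : j < cs.length then
    if !pvIsSep cs[j] then pvScanEnd cs (j + 1) else j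
  else j
termination_by cs.length - j

theorem pvScanEnd_ge (cs : List Char) (j : Nat) : j ≤ pvScanEnd cs j := by
  unfold pvScanEnd
  split
  · split
    · exact Nat.le_trans (Nat.le_succ j) (pvScanEnd_ge cs (j + 1))
    · exact Nat.le_refl j
  · exact Nat.le_refl j
termination_by cs.length - j

-- the outer 'while i < n' loop over one word; word[i:j] = (cs.drop i).take (j - i) (exact here: 0 ≤ i ≤ j ≤ n)
def pvScanWord (cs : List Char) (i : Nat) (out : List String) : List String :=
  if h : i < cs.length then
    if pvIsSep cs[i] then pvScanWord cs (i + 1) out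
    else
      let j := pvScanEnd cs (i + 1)
      pvScanWord cs j (out ++ [pvLowerTok ((cs.drop i).take (j - i))])
  else out
termination_by cs.length - i
decreasing_by
  · omega
  · have := pvScanEnd_ge cs (i + 1); omega

def remove_punctuations_in_list_alt (list : List String) : List String :=
  list.foldl (fun out word => pvScanWord word.toList 0 out) []

-- ===== PRECONDITION & SPEC =====
def Spec_remove_punctuations_in_list (list : List String) (out : List String) : Prop := out = remove_punctuations_in_list_alt list
instance (list : List String) (out : List String) : Decidable (Spec_remove_punctuations_in_list list out) := by unfold Spec_remove_punctuations_in_list; infer_instance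

-- ===== CLAIM (what is proved, stated in full; the proofs are below) =====
def Claim_equal_remove_punctuations_in_list : Prop := ∀ (list : List String), Dom_remove_punctuations_in_list list → Spec_remove_punctuations_in_list list (remove_punctuations_in_list list)

-- ===== LEMMAS AND PROOFS =====

-- common characterisation: the maximal non-separator runs of a character list
def pvTokens : List Char → List (List Char)
  | [] => []
  | c :: cs =>
    if pvIsSep c then pvTokens cs
    else (c :: cs.takeWhile (fun x => !pvIsSep x)) :: pvTokens (cs.dropWhile (fun x => !pvIsSep x))
termination_by l => l.length
decreasing_by
  · simp
  · have := cs.length_dropWhile_le (fun x => !pvIsSep x); simp; omega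

-- merge of a pending accumulator w (no separators inside) with the runs of cs
def pvMerge (w cs : List Char) : List (List Char) :=
  if w = [] then pvTokens cs
  else (w ++ cs.takeWhile (fun x => !pvIsSep x)) :: pvTokens (cs.dropWhile (fun x => !pvIsSep x))

theorem pvMerge_cons_sep (w : List Char) {c : Char} (hc : pvIsSep c = true) (cs : List Char) :
    pvMerge w (c :: cs) = (if w = [] then [] else [w]) ++ pvTokens cs := by
  unfold pvMerge
  split <;> simp [pvTokens, hc]

theorem pvMerge_cons_nonsep (w : List Char) {c : Char} (hc : pvIsSep c = false) (cs : List Char) :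
    pvMerge w (c :: cs) = pvMerge (w ++ [c]) cs := by
  unfold pvMerge
  split
  · next hw => subst hw; simp [pvTokens, hc]
  · simp [hc]

-- A's inner loop + trailing flush computes ws ++ lowered runs
theorem pvA_inner (cs : List Char) : ∀ (ws : List String) (w : List Char),
    (let st := cs.foldl pvStepA (ws, w)
     if st.2 ≠ [] then st.1 ++ [pvLowerTok st.2] else st.1)
    = ws ++ (pvMerge w cs).map pvLowerTok := by
  induction cs with
  | nil =>
    intro ws w
    by_cases hw : w = [] <;> simp [pvMerge, pvTokens, hw]
  | cons c cs ih =>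
    intro ws w
    simp only [List.foldl_cons]
    by_cases hc : pvIsSep c
    · rw [pvMerge_cons_sep w hc cs]
      by_cases hw : w = []
      · subst hw
        have h1 : pvStepA (ws, []) c = (ws, []) := by simp [pvStepA, hc]
        rw [h1]
        simpa [pvMerge] using ih ws []
      · have h1 : pvStepA (ws, w) c = (ws ++ [pvLowerTok w], []) := by
          simp [pvStepA, hc, hw]
        rw [h1]
        have := ih (ws ++ [pvLowerTok w]) []
        simp only [pvMerge] at this
        simp [this, hw]
    · rw [pvMerge_cons_nonsep w (by simpa using hc) cs]
      have h1 : pvStepA (ws, w) c = (ws, w ++ [c]) := by simp [pvStepA, hc]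
      rw [h1]
      exact ih ws (w ++ [c])

theorem pvWordA_eq (ws : List String) (word : String) :
    pvWordA ws word = ws ++ (pvTokens word.toList).map pvLowerTok := by
  have := pvA_inner word.toList ws []
  simpa [pvWordA, pvMerge] using this

-- B-side: scanEnd finds the end of the current run
theorem pvScanEnd_eq (cs : List Char) (j : Nat) :
    pvScanEnd cs j = j + ((cs.drop j).takeWhile (fun x => !pvIsSep x)).length := by
  unfold pvScanEnd
  split
  · next h =>
    have hdrop : cs.drop j = cs[j] :: cs.drop (j + 1) := List.drop_eq_getElem_cons h
    split
    · next hs =>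
      rw [pvScanEnd_eq cs (j + 1), hdrop, List.takeWhile_cons, if_pos hs]
      simp; omega
    · next hs =>
      rw [hdrop, List.takeWhile_cons, if_neg hs]
      simp
  · next h =>
    rw [List.drop_eq_nil_of_le (by omega)]
    simp
termination_by cs.length - j

theorem pvTake_takeWhile (p : Char → Bool) (l : List Char) :
    l.take (l.takeWhile p).length = l.takeWhile p := by
  induction l with
  | nil => simp
  | cons c cs ih =>
    by_cases hc : p c <;> simp [hc, ih]

theorem pvDropWhile_eq_drop (p : Char → Bool) (l : List Char) :
    l.dropWhile p = l.drop (l.takeWhile p).length := by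
  induction l with
  | nil => simp
  | cons c cs ih =>
    by_cases hc : p c <;> simp [hc, ih]

theorem pvScanWord_eq (cs : List Char) (i : Nat) (out : List String) :
    pvScanWord cs i out = out ++ (pvTokens (cs.drop i)).map pvLowerTok := by
  unfold pvScanWord
  split
  · next h =>
    have hdrop : cs.drop i = cs[i] :: cs.drop (i + 1) := List.drop_eq_getElem_cons h
    split
    · next hs =>
      rw [pvScanWord_eq cs (i + 1) out, hdrop, pvTokens, if_pos hs]
    · next hs =>
      have hs' : pvIsSep cs[i] = false := by simpa using hs
      have hj : pvScanEnd cs (i + 1)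
          = i + 1 + ((cs.drop (i + 1)).takeWhile (fun x => !pvIsSep x)).length :=
        pvScanEnd_eq cs (i + 1)
      rw [pvScanWord_eq cs (pvScanEnd cs (i + 1)) _, hdrop, pvTokens, if_neg (by simp [hs'])]
      have htok : (cs[i] :: cs.drop (i + 1)).take (pvScanEnd cs (i + 1) - i)
          = cs[i] :: (cs.drop (i + 1)).takeWhile (fun x => !pvIsSep x) := by
        rw [hj]
        have heq : i + 1 + ((cs.drop (i + 1)).takeWhile (fun x => !pvIsSep x)).length - i
            = ((cs.drop (i + 1)).takeWhile (fun x => !pvIsSep x)).length + 1 := by omega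
        rw [heq, List.take_succ_cons, pvTake_takeWhile]
      have hrest : cs.drop (pvScanEnd cs (i + 1))
          = (cs.drop (i + 1)).dropWhile (fun x => !pvIsSep x) := by
        rw [hj, pvDropWhile_eq_drop, ← List.drop_drop]
      rw [htok, hrest]
      simp
  · next h =>
    rw [List.drop_eq_nil_of_le (by omega)]
    simp [pvTokens]
termination_by cs.length - i
decreasing_by
  · omega
  · have := pvScanEnd_ge cs (i + 1); omega

theorem pvOuter (l : List String) : ∀ (acc : List String),
    l.foldl pvWordA acc = l.foldl (fun out word => pvScanWord word.toList 0 out) acc := by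
  induction l with
  | nil => intro acc; rfl
  | cons w l ih =>
    intro acc
    simp only [List.foldl_cons]
    rw [ih, pvWordA_eq, pvScanWord_eq]
    simp

-- ===== VERDICT (by name: the statement is the Claim_ definition above) =====
theorem remove_punctuations_in_list_spec : Claim_equal_remove_punctuations_in_list := by
  intro l _
  unfold Spec_remove_punctuations_in_list remove_punctuations_in_list remove_punctuations_in_list_alt
  exact pvOuter l []
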